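-- pv_equiv track=rewrite | github.com/princekumar828/epassfromserver | EPAS/extract_wild.py | content2List
-- ===== SOURCE A (Python) =====
-- def content2List(content):
--     StrList = []
--     index = 0
--     while (index < len(content)):
--         word_now = content[index]
--         if (content[index:index + 3] == "<*>"):
--             StrList.append("<*>")
--             index = index + 3
--         elif (content[index:index + 2] == "<*"):
--             StrList.append("<*>")
--             index = index + 2
--         elif (content[index:index + 2] == "*>"):
--             StrList.append("<*>")
--             index = index + 2
--         else:
--             StrList.append(word_now)
--             index += 1
--     return StrList
-- ===== SOURCE B (Python) =====
-- def content2List(content):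
--     # Three C-level replace passes mark every wildcard token with a placeholder,
--     # then one comprehension maps placeholders to "<*>" and chars to themselves.
--     marked = content.replace("<*>", "\x00").replace("<*", "\x00").replace("*>", "\x00")
--     return ["<*>" if c == "\x00" else c for c in marked]
-- ===== Notes on version B (the rewrite author's own statement) =====
-- stated objective: faster
-- what changed: Replaced the manual index/slice while-loop with three C-level str.replace passes that mark each wildcard token (<*>, <*, *>) with a placeholder, followed by a single comprehension over the marked string.
import Mathlib
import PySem

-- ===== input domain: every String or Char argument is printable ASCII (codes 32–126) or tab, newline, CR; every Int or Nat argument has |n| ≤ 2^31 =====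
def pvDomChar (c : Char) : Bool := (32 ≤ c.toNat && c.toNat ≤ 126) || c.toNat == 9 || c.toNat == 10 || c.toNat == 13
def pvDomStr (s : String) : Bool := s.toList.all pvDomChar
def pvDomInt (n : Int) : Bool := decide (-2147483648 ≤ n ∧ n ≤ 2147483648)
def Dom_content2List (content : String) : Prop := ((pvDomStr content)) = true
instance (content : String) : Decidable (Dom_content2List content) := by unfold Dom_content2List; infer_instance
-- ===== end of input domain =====

-- B marks wildcard tokens with three str.replace passes and maps over the result (idiomatic rewrite of A's manual index/slice scan); equal return values on the printable domain.


-- ===== PORT A =====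
-- while-loop of A: index-based scan with slice comparisons, appending to StrList
def content2ListLoop (cs : List Char) (index : Nat) (acc : List String) : List String :=
  if _h : index < cs.length then
    let word_now := PySem.List.pyGetD cs (index : Int) ' '
    if PySem.List.slice cs (some (index : Int)) (some ((index : Int) + 3)) = ['<', '*', '>'] then
      content2ListLoop cs (index + 3) (acc ++ ["<*>"])
    else if PySem.List.slice cs (some (index : Int)) (some ((index : Int) + 2)) = ['<', '*'] then
      content2ListLoop cs (index + 2) (acc ++ ["<*>"])
    else if PySem.List.slice cs (some (index : Int)) (some ((index : Int) + 2)) = ['*', '>'] then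
      content2ListLoop cs (index + 2) (acc ++ ["<*>"])
    else
      content2ListLoop cs (index + 1) (acc ++ [String.mk [word_now]])
  else acc
termination_by cs.length - index

def content2List (content : String) : List String :=
  content2ListLoop content.toList 0 []

-- ===== PORT B =====
def content2List_alt (content : String) : List String :=
  let marked := PySem.Str.replace (PySem.Str.replace (PySem.Str.replace content "<*>" "\u0000") "<*" "\u0000") "*>" "\u0000"
  marked.toList.map (fun c => if c = '\u0000' then "<*>" else String.mk [c])

-- ===== PRECONDITION & SPEC =====
def Spec_content2List (content : String) (out : List String) : Prop := out = content2List_alt content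
instance (content : String) (out : List String) : Decidable (Spec_content2List content out) := by unfold Spec_content2List; infer_instance

-- ===== CLAIM (what is proved, stated in full; the proofs are below) =====
def Claim_equal_content2List : Prop := ∀ (content : String), Dom_content2List content → Spec_content2List content (content2List content)

-- ===== LEMMAS AND PROOFS =====

-- canonical greedy tokenizer, the common reference point of both ports
def tok (l : List Char) : List String :=
  match l with
  | [] => []
  | c :: t =>
    if (c :: t).take 3 = ['<', '*', '>'] then "<*>" :: tok ((c :: t).drop 3)
    else if (c :: t).take 2 = ['<', '*'] then "<*>" :: tok ((c :: t).drop 2)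
    else if (c :: t).take 2 = ['*', '>'] then "<*>" :: tok ((c :: t).drop 2)
    else String.mk [c] :: tok t
termination_by l.length
decreasing_by all_goals (simp; try omega)

-- structural form of PySem.Chars.replace for a nonempty pattern
def myRep (old new : List Char) : List Char → List Char
  | [] => []
  | c :: t =>
    if 0 < old.length ∧ old.isPrefixOf (c :: t) then
      new ++ myRep old new (t.drop (old.length - 1))
    else
      c :: myRep old new t
termination_by l => l.length
decreasing_by all_goals (simp; try omega)

theorem myRep_pos (old new : List Char) (c : Char) (t : List Char)
    (h : 0 < old.length ∧ old.isPrefixOf (c :: t)) :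
    myRep old new (c :: t) = new ++ myRep old new (t.drop (old.length - 1)) := by
  rw [myRep, if_pos h]

theorem myRep_neg (old new : List Char) (c : Char) (t : List Char)
    (h : ¬ (0 < old.length ∧ old.isPrefixOf (c :: t))) :
    myRep old new (c :: t) = c :: myRep old new t := by
  rw [myRep, if_neg h]

theorem go_eq_myRep (old new : List Char) (hold : old ≠ []) :
    ∀ (fuel : Nat) (l acc : List Char), l.length ≤ fuel →
      PySem.Chars.replace.go old new fuel l acc = acc.reverse ++ myRep old new l := by
  intro fuel
  induction fuel with
  | zero =>
    intro l acc hl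
    have : l = [] := List.eq_nil_of_length_eq_zero (Nat.le_zero.1 hl)
    subst this
    simp [PySem.Chars.replace.go, myRep]
  | succ n ih =>
    intro l acc hl
    match l with
    | [] => simp [PySem.Chars.replace.go, myRep]
    | c :: t =>
      rw [PySem.Chars.replace.go]
      have h2 : 0 < old.length := List.length_pos_iff.2 hold
      by_cases hp : old.isPrefixOf (c :: t)
      · have h1 : old.length ≤ (c :: t).length := (List.isPrefixOf_iff_prefix.1 hp).length_le
        rw [if_pos hp, ih _ _ (by simp at hl ⊢; omega)]
        rw [myRep, if_pos ⟨h2, hp⟩]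
        have hdrop : (c :: t).drop old.length = t.drop (old.length - 1) := by
          match old, h2 with
          | o :: os, _ => simp
        rw [← hdrop]
        simp
      · rw [if_neg hp, ih _ _ (by simp at hl ⊢; omega)]
        rw [myRep, if_neg (by simp [hp])]
        simp

theorem replace_eq_myRep (s old new : List Char) (hold : old ≠ []) :
    PySem.Chars.replace s old new = myRep old new s := by
  rw [PySem.Chars.replace, if_neg (by simp [hold])]
  simpa using go_eq_myRep old new hold s.length s [] le_rfl

-- head of a replacement output is the placeholder-head or the original head
theorem myRep_head (old : List Char) (h0 : Char) (l : List Char) (c : Char) (r : List Char)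
    (h : myRep old [h0] l = c :: r) : c = h0 ∨ l.head? = some c := by
  match l with
  | [] => rw [myRep] at h; exact absurd h (by simp)
  | a :: t =>
    rw [myRep] at h
    split at h
    · left; exact (List.cons_eq_cons.1 h).1.symm
    · right; simp [(List.cons_eq_cons.1 h).1.symm]

-- A's loop computes tok of the remaining suffix
theorem loop_eq_tok (cs : List Char) :
    ∀ (index : Nat) (acc : List String),
      content2ListLoop cs index acc = acc ++ tok (cs.drop index) := by
  intro index acc
  fun_induction content2ListLoop cs index acc with
  | case1 index acc h h3 ih =>
    rw [ih]
    have hd : cs.drop (index + 3) = (cs.drop index).drop 3 := by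
      rw [List.drop_drop]
    have hc3 : ((index : Int) + 3) = (((index + 3 : Nat)) : Int) := by push_cast; ring
    rw [hc3, PySem.List.slice_natCast, Nat.add_sub_cancel_left] at h3
    match hcs : cs.drop index with
    | [] => rw [hcs] at h3; simp at h3
    | c :: t =>
      rw [hcs] at h3 hd
      rw [hd, tok, if_pos h3]
      simp
  | case2 index acc h h3 h2 ih =>
    rw [ih]
    have hd : cs.drop (index + 2) = (cs.drop index).drop 2 := by
      rw [List.drop_drop]
    have hc3 : ((index : Int) + 3) = (((index + 3 : Nat)) : Int) := by push_cast; ring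
    rw [hc3, PySem.List.slice_natCast, Nat.add_sub_cancel_left] at h3
    have hc2 : ((index : Int) + 2) = (((index + 2 : Nat)) : Int) := by push_cast; ring
    rw [hc2, PySem.List.slice_natCast, Nat.add_sub_cancel_left] at h2
    match hcs : cs.drop index with
    | [] => rw [hcs] at h2; simp at h2
    | c :: t =>
      rw [hcs] at h3 h2 hd
      rw [hd, tok, if_neg h3, if_pos h2]
      simp
  | case3 index acc h h3 h2 h2' ih =>
    rw [ih]
    have hd : cs.drop (index + 2) = (cs.drop index).drop 2 := by
      rw [List.drop_drop]
    have hc3 : ((index : Int) + 3) = (((index + 3 : Nat)) : Int) := by push_cast; ring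
    rw [hc3, PySem.List.slice_natCast, Nat.add_sub_cancel_left] at h3
    have hc2 : ((index : Int) + 2) = (((index + 2 : Nat)) : Int) := by push_cast; ring
    rw [hc2, PySem.List.slice_natCast, Nat.add_sub_cancel_left] at h2 h2'
    match hcs : cs.drop index with
    | [] => rw [hcs] at h2'; simp at h2'
    | c :: t =>
      rw [hcs] at h3 h2 h2' hd
      rw [hd, tok, if_neg h3, if_neg h2, if_pos h2']
      simp
  | case4 index acc h word_now h3 h2 h2' ih =>
    rw [ih]
    have hd : cs.drop (index + 1) = (cs.drop index).drop 1 := by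
      rw [List.drop_drop]
    have hc3 : ((index : Int) + 3) = (((index + 3 : Nat)) : Int) := by push_cast; ring
    rw [hc3, PySem.List.slice_natCast, Nat.add_sub_cancel_left] at h3
    have hc2 : ((index : Int) + 2) = (((index + 2 : Nat)) : Int) := by push_cast; ring
    rw [hc2, PySem.List.slice_natCast, Nat.add_sub_cancel_left] at h2 h2'
    match hcs : cs.drop index with
    | [] =>
      have hlen := congrArg List.length hcs
      simp at hlen
      omega
    | c :: t =>
      have hw : PySem.List.pyGetD cs (index : Int) ' ' = c := by
        have hg : cs[index]? = some c := by
          rw [← List.head?_drop, hcs]; rfl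
        simp [PySem.List.pyGetD_natCast, List.getD, hg]
      rw [hcs] at h3 h2 h2' hd
      have hwn : word_now = c := hw
      rw [hd, tok, if_neg h3, if_neg h2, if_neg h2', hwn]
      simp
  | case5 index acc h =>
    have : cs.drop index = [] := by
      apply List.drop_eq_nil_of_le; omega
    simp [this, tok]

-- B's chained replaces followed by the map compute tok, for NUL-free input
theorem rep_chain_eq_tok (l : List Char) (hfree : '\u0000' ∉ l) :
    (myRep ['*', '>'] ['\u0000'] (myRep ['<', '*'] ['\u0000'] (myRep ['<', '*', '>'] ['\u0000'] l))).map
      (fun c => if c = '\u0000' then "<*>" else String.mk [c]) = tok l := by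
  fun_induction tok l with
  | case1 => simp [myRep]
  | case2 c t h3 ih =>
    match t, h3, ih, hfree with
    | b :: d :: t', h3, ih, hfree =>
      obtain ⟨hc, hb, hd⟩ : c = '<' ∧ b = '*' ∧ d = '>' := by
        simpa [List.take_succ_cons] using h3
      subst hc; subst hb; subst hd
      have hfree' : '\u0000' ∉ t' := fun hm => hfree (by simp [hm])
      rw [myRep_pos ['<', '*', '>'] ['\u0000'] '<' ('*' :: '>' :: t')
        ⟨by simp, by simp [List.isPrefixOf]⟩]
      simp only [List.singleton_append, List.length_cons, List.length_nil, Nat.add_sub_cancel,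
        List.drop_succ_cons, List.drop_zero]
      rw [myRep_neg ['<', '*'] ['\u0000'] '\u0000' (myRep ['<', '*', '>'] ['\u0000'] t')
        (by simp [List.isPrefixOf])]
      rw [myRep_neg ['*', '>'] ['\u0000'] '\u0000'
        (myRep ['<', '*'] ['\u0000'] (myRep ['<', '*', '>'] ['\u0000'] t'))
        (by simp [List.isPrefixOf])]
      simp only [List.map_cons, List.drop_succ_cons, List.drop_zero] at ih ⊢
      rw [ih hfree']
      simp
  | case3 c t h3 h2 ih =>
    match t, h3, h2, ih, hfree with
    | b :: t', h3, h2, ih, hfree =>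
      obtain ⟨hc, hb⟩ : c = '<' ∧ b = '*' := by
        simpa [List.take_succ_cons] using h2
      subst hc; subst hb
      have hfree' : '\u0000' ∉ t' := fun hm => hfree (by simp [hm])
      have hne : ¬ (['<', '*', '>'].isPrefixOf ('<' :: '*' :: t') = true) := by
        intro hp
        apply h3
        rw [List.isPrefixOf_iff_prefix] at hp
        simpa [List.take_succ_cons] using (List.prefix_iff_eq_take.1 hp).symm
      rw [myRep_neg ['<', '*', '>'] ['\u0000'] '<' ('*' :: t') (by simp [hne])]
      rw [myRep_neg ['<', '*', '>'] ['\u0000'] '*' t' (by simp [List.isPrefixOf])]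
      rw [myRep_pos ['<', '*'] ['\u0000'] '<' ('*' :: myRep ['<', '*', '>'] ['\u0000'] t')
        ⟨by simp, by simp [List.isPrefixOf]⟩]
      simp only [List.singleton_append, List.length_cons, List.length_nil, Nat.add_sub_cancel,
        List.drop_succ_cons, List.drop_zero]
      rw [myRep_neg ['*', '>'] ['\u0000'] '\u0000'
        (myRep ['<', '*'] ['\u0000'] (myRep ['<', '*', '>'] ['\u0000'] t'))
        (by simp [List.isPrefixOf])]
      simp only [List.map_cons, List.drop_succ_cons, List.drop_zero] at ih ⊢
      rw [ih hfree']
      simp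
  | case4 c t h3 h2 h2' ih =>
    match t, h2', ih, hfree with
    | b :: t', h2', ih, hfree =>
      obtain ⟨hc, hb⟩ : c = '*' ∧ b = '>' := by
        simpa [List.take_succ_cons] using h2'
      subst hc; subst hb
      have hfree' : '\u0000' ∉ t' := fun hm => hfree (by simp [hm])
      rw [myRep_neg ['<', '*', '>'] ['\u0000'] '*' ('>' :: t') (by simp [List.isPrefixOf])]
      rw [myRep_neg ['<', '*', '>'] ['\u0000'] '>' t' (by simp [List.isPrefixOf])]
      rw [myRep_neg ['<', '*'] ['\u0000'] '*' ('>' :: myRep ['<', '*', '>'] ['\u0000'] t')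
        (by simp [List.isPrefixOf])]
      rw [myRep_neg ['<', '*'] ['\u0000'] '>' (myRep ['<', '*', '>'] ['\u0000'] t')
        (by simp [List.isPrefixOf])]
      rw [myRep_pos ['*', '>'] ['\u0000'] '*'
        ('>' :: myRep ['<', '*'] ['\u0000'] (myRep ['<', '*', '>'] ['\u0000'] t'))
        ⟨by simp, by simp [List.isPrefixOf]⟩]
      simp only [List.singleton_append, List.length_cons, List.length_nil, Nat.add_sub_cancel,
        List.drop_succ_cons, List.drop_zero]
      simp only [List.map_cons, List.drop_succ_cons, List.drop_zero] at ih ⊢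
      rw [ih hfree']
      simp
  | case5 c t h3 h2 h2' ih =>
    have hfree' : '\u0000' ∉ t := fun hm => hfree (List.mem_cons_of_mem c hm)
    have hcne : c ≠ '\u0000' := fun hcc => hfree (hcc ▸ List.mem_cons_self)
    have hne3 : ¬ (['<', '*', '>'].isPrefixOf (c :: t) = true) := by
      intro hp
      rw [List.isPrefixOf_iff_prefix] at hp
      exact h3 (by simpa using (List.prefix_iff_eq_take.1 hp).symm)
    have hne2 : ¬ (['<', '*'].isPrefixOf (c :: t) = true) := by
      intro hp
      rw [List.isPrefixOf_iff_prefix] at hp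
      exact h2 (by simpa using (List.prefix_iff_eq_take.1 hp).symm)
    have hne2' : ¬ (['*', '>'].isPrefixOf (c :: t) = true) := by
      intro hp
      rw [List.isPrefixOf_iff_prefix] at hp
      exact h2' (by simpa using (List.prefix_iff_eq_take.1 hp).symm)
    rw [myRep_neg ['<', '*', '>'] ['\u0000'] c t (by simp [hne3])]
    have hpre2 : ¬ (['<', '*'].isPrefixOf (c :: myRep ['<', '*', '>'] ['\u0000'] t) = true) := by
      intro hp
      simp only [List.isPrefixOf, Bool.and_eq_true, beq_iff_eq] at hp
      obtain ⟨hc, hrest⟩ := hp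
      match hXe : myRep ['<', '*', '>'] ['\u0000'] t, hrest with
      | x :: xs, hrest =>
        simp only [List.isPrefixOf, Bool.and_eq_true, beq_iff_eq] at hrest
        have hx : x = '*' := hrest.1.symm
        rcases myRep_head _ _ _ _ _ hXe with hh | hh
        · exact absurd (hx.symm.trans hh) (by decide)
        · apply hne2
          obtain ⟨b, t2, rfl⟩ : ∃ b t2, t = b :: t2 := by
            cases t with
            | nil => simp at hh
            | cons b t2 => exact ⟨b, t2, rfl⟩
          simp only [List.head?_cons, Option.some.injEq] at hh
          simp [List.isPrefixOf, ← hc, hh.trans hx]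
    rw [myRep_neg ['<', '*'] ['\u0000'] c (myRep ['<', '*', '>'] ['\u0000'] t)
      (by simp [hpre2])]
    have hpre3 : ¬ (['*', '>'].isPrefixOf
        (c :: myRep ['<', '*'] ['\u0000'] (myRep ['<', '*', '>'] ['\u0000'] t)) = true) := by
      intro hp
      simp only [List.isPrefixOf, Bool.and_eq_true, beq_iff_eq] at hp
      obtain ⟨hc, hrest⟩ := hp
      match hYe : myRep ['<', '*'] ['\u0000'] (myRep ['<', '*', '>'] ['\u0000'] t), hrest with
      | y :: ys, hrest =>
        simp only [List.isPrefixOf, Bool.and_eq_true, beq_iff_eq] at hrest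
        have hy : y = '>' := hrest.1.symm
        rcases myRep_head _ _ _ _ _ hYe with hh | hh
        · exact absurd (hy.symm.trans hh) (by decide)
        · match hXe : myRep ['<', '*', '>'] ['\u0000'] t, hh with
          | x :: xs, hh =>
            have hxy : x = y := by simpa using hh
            rcases myRep_head _ _ _ _ _ hXe with hh2 | hh2
            · exact absurd ((hxy.trans hy).symm.trans hh2) (by decide)
            · apply hne2'
              obtain ⟨b, t2, rfl⟩ : ∃ b t2, t = b :: t2 := by
                cases t with
                | nil => simp at hh2
                | cons b t2 => exact ⟨b, t2, rfl⟩
              have hbx : b = x := by simpa using hh2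
              simp [List.isPrefixOf, ← hc, hbx.trans (hxy.trans hy)]
    rw [myRep_neg ['*', '>'] ['\u0000'] c
      (myRep ['<', '*'] ['\u0000'] (myRep ['<', '*', '>'] ['\u0000'] t)) (by simp [hpre3])]
    simp only [List.map_cons, if_neg hcne]
    rw [ih hfree']

-- ===== VERDICT (by name: the statement is the Claim_ definition above) =====
theorem content2List_spec : Claim_equal_content2List := by
  intro content hdom
  unfold Spec_content2List content2List content2List_alt
  have hfree : '\u0000' ∉ content.toList := by
    intro hm
    unfold Dom_content2List pvDomStr at hdom
    have := List.all_eq_true.1 hdom _ hm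
    simp [pvDomChar] at this
  rw [loop_eq_tok, List.drop_zero, List.nil_append]
  simp only [PySem.Str.toList_replace]
  rw [replace_eq_myRep _ _ _ (by decide), replace_eq_myRep _ _ _ (by decide),
      replace_eq_myRep _ _ _ (by decide)]
  have h1 : ("<*>" : String).toList = ['<', '*', '>'] := by decide
  have h2 : ("<*" : String).toList = ['<', '*'] := by decide
  have h3 : ("*>" : String).toList = ['*', '>'] := by decide
  have h0 : ("\u0000" : String).toList = ['\u0000'] := by decide
  rw [h1, h2, h3, h0]
  exact (rep_chain_eq_tok content.toList hfree).symm
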